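-- pv_equiv track=rewrite | github.com/sourcery-ai-bot/Snowmobile | src/snowmobile/snowloader.py | standardize_col
-- ===== SOURCE A (Python) =====
-- import string
-- import itertools
--
-- def standardize_col(col: str) -> str:
--     """Standardize a column for Snowflake table.
--     (1) Replaces spaces with underscores, trims leading & trailing
--         underscores, forces upper-case
--     (2) Replaces special characters with underscores
--     (3) Reduces repeated special characters
--
--     Args:
--         col: A single string value of a column name
--     Returns:
--         col: A string that has been re-formatted/standardized for Snowflake
--                 standards
--     """
--     col = ((col.replace(' ', '_')).strip('_')).upper()  # 1
--
--     invalid_punct = [punct for punct in string.punctuation if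
--                      punct != '_']  # 2
--     repl_invalid_punct = str.maketrans(''.join(invalid_punct),
--                                        '_' * len(invalid_punct))
--     col = ''.join(col.translate(repl_invalid_punct))
--
--     new_chars = []  # 3
--
--     for k, v in itertools.groupby(col):
--         v_list = list(v)
--
--         if k in string.punctuation or k in string.whitespace:
--             new_chars.append(k)
--
--         else:
--             new_chars.append(''.join(v_list))
--
--     col = ''.join(new_chars)
--
--     return col
-- ===== SOURCE B (Python) =====
-- import string
--
-- _PUNCT_NO_UNDERSCORE = set(string.punctuation) - {'_'}
-- _COLLAPSIBLE = set('_\t\n\r\x0b\x0c')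
--
-- def standardize_col(col: str) -> str:
--     """Standardize a column name for Snowflake in a single pass.
--
--     After replacing spaces with underscores, stripping edge underscores and
--     upper-casing, walk the string once: map each special character to '_' and
--     emit it only when it does not repeat the previous emitted collapsible
--     character.
--     """
--     col = col.replace(' ', '_').strip('_').upper()
--     out = []
--     prev = None
--     for ch in col:
--         if ch in _PUNCT_NO_UNDERSCORE:
--             ch = '_'
--         if ch == prev and ch in _COLLAPSIBLE:
--             continue
--         out.append(ch)
--         prev = ch
--     return ''.join(out)
-- ===== Notes on version B (the rewrite author's own statement) =====
-- stated objective: simpler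
-- what changed: Replaced A's separate translate pass plus itertools.groupby run-length grouping (building a list-of-runs and re-joining) with a single left-to-right pass that maps each character and skips it when it repeats the previously emitted collapsible character.
import Mathlib
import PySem

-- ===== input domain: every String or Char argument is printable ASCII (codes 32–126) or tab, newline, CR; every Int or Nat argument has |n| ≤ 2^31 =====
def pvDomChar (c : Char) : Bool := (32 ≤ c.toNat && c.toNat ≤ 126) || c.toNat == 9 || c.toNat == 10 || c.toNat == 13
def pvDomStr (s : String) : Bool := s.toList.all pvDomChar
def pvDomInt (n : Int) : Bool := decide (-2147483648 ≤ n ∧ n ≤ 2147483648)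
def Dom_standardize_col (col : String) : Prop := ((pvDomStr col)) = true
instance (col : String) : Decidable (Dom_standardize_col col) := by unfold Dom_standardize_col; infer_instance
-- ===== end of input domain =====

-- B replaces A's translate pass plus itertools.groupby run-length loop by a single left-to-right
-- pass that maps each character and drops it when it repeats the previously emitted collapsible
-- character (objective: simpler — one pass, no grouping).

-- ===== PORT A =====
-- string.punctuation / string.whitespace (module-level stdlib constants both programs read)
def pvPunct : List Char :=
  ['!','"','#','$','%','&','\'','(',')','*','+',',','-','.','/',':',';','<','=','>','?','@','[','\\',']','^','_','`','{','|','}','~']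
def pvWhitespace : List Char := [' ','\t','\n','\r','\x0b','\x0c']

-- invalid_punct = [punct for punct in string.punctuation if punct != '_']
def pvInvalidPunct : List Char := pvPunct.filter (fun p => p ≠ '_')

-- col.translate(str.maketrans(invalid_punct → '_')) applied to one character
def pvTranslateA (c : Char) : Char := if pvInvalidPunct.contains c then '_' else c

-- the itertools.groupby loop of step (3): split off the leading run of equal characters,
-- keep one copy for punctuation/whitespace keys, the whole run otherwise
def pvGroupbyA : List Char → List Char
  | [] => []
  | c :: rest =>
      (if pvPunct.contains c || pvWhitespace.contains c then [c]
       else c :: rest.takeWhile (fun x => x == c)) ++ pvGroupbyA (rest.dropWhile (fun x => x == c))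
termination_by l => l.length
decreasing_by
  have := List.length_dropWhile_le (fun x => x == c) rest
  simpa using Nat.lt_succ_of_le this

def standardize_col (col : String) : String :=
  let col1 := PySem.Str.upper (PySem.Str.stripChars (PySem.Str.replace col " " "_") "_")  -- 1
  String.mk (pvGroupbyA (col1.toList.map pvTranslateA))                                   -- 2, 3

-- ===== PORT B =====
-- _PUNCT_NO_UNDERSCORE = set(string.punctuation) - {'_'}
def pvSpecialB : List Char := pvPunct.filter (fun p => p ≠ '_')
-- _COLLAPSIBLE = set('_\t\n\r\x0b\x0c')
def pvCollapsibleB : List Char := ['_','\t','\n','\r','\x0b','\x0c']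

-- the single pass of Source B: map special chars to '_', skip a collapsible repeat of prev
def pvCollapseB (prev : Option Char) : List Char → List Char
  | [] => []
  | c :: rest =>
      let m := if pvSpecialB.contains c then '_' else c
      if prev == some m && pvCollapsibleB.contains m then pvCollapseB prev rest
      else m :: pvCollapseB (some m) rest

def standardize_col_alt (col : String) : String :=
  let col1 := PySem.Str.upper (PySem.Str.stripChars (PySem.Str.replace col " " "_") "_")
  String.mk (pvCollapseB none col1.toList)

-- ===== PRECONDITION & SPEC =====
def Spec_standardize_col (col : String) (out : String) : Prop := out = standardize_col_alt col
instance (col : String) (out : String) : Decidable (Spec_standardize_col col out) := by unfold Spec_standardize_col; infer_instance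

-- ===== CLAIM (what is proved, stated in full; the proofs are below) =====
def Claim_equal_standardize_col : Prop := ∀ (col : String), Dom_standardize_col col → Spec_standardize_col col (standardize_col col)

-- ===== LEMMAS AND PROOFS =====

-- B's per-character map is definitionally A's translation table
theorem pvCollapseB_cons (prev : Option Char) (c : Char) (rest : List Char) :
    pvCollapseB prev (c :: rest) =
      if prev == some (pvTranslateA c) && pvCollapsibleB.contains (pvTranslateA c)
      then pvCollapseB prev rest
      else pvTranslateA c :: pvCollapseB (some (pvTranslateA c)) rest := rfl

theorem pvCollapseB_none_cons (c : Char) (rest : List Char) :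
    pvCollapseB none (c :: rest) = pvTranslateA c :: pvCollapseB (some (pvTranslateA c)) rest := by
  rw [pvCollapseB_cons]; simp

-- on translated characters other than ' ', A's collapse test (punctuation or whitespace)
-- agrees with B's collapsible set
theorem pvClassEq (c : Char) (hc : c ≠ ' ') :
    (pvPunct.contains (pvTranslateA c) || pvWhitespace.contains (pvTranslateA c))
      = pvCollapsibleB.contains (pvTranslateA c) := by
  unfold pvTranslateA
  by_cases h : pvInvalidPunct.contains c = true
  · rw [if_pos h]; decide
  · rw [if_neg h]
    have hinv : c ∉ pvInvalidPunct := fun hm => h (List.contains_iff_mem.mpr hm)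
    by_cases hp : c ∈ pvPunct
    · have : c = '_' := by
        by_contra hne
        exact hinv (List.mem_filter.mpr ⟨hp, by simpa using hne⟩)
      subst this; decide
    · have h1 : pvPunct.contains c = false := by simpa using hp
      have h2 : c ≠ '_' := fun h' => hp (h' ▸ (by decide : ('_' : Char) ∈ pvPunct))
      rw [h1, Bool.false_or]
      simp [pvWhitespace, pvCollapsibleB, hc, h2]

-- prev is irrelevant when it is not collapsible
theorem pvSkipNone (k : Char) (hk : pvCollapsibleB.contains k = false) (l : List Char) :
    pvCollapseB (some k) l = pvCollapseB none l := by
  cases l with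
  | nil => rfl
  | cons c rest =>
      rw [pvCollapseB_cons, pvCollapseB_none_cons]
      have hcond : (some k == some (pvTranslateA c) && pvCollapsibleB.contains (pvTranslateA c)) = false := by
        by_cases hm : pvTranslateA c = k
        · rw [hm, hk, Bool.and_false]
        · have : (some k == some (pvTranslateA c)) = false := by
            rw [beq_eq_false_iff_ne]
            intro h'; exact hm (Option.some_inj.mp h').symm
          rw [this, Bool.false_and]
      rw [hcond]; simp

-- a collapsible prev swallows the leading run of characters translating to it
theorem pvSkipRun (k : Char) (hk : pvCollapsibleB.contains k = true) (l : List Char) :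
    pvCollapseB (some k) l = pvCollapseB (some k) (l.dropWhile (fun x => pvTranslateA x == k)) := by
  induction l with
  | nil => rfl
  | cons c rest ih =>
      by_cases hc : pvTranslateA c = k
      · rw [List.dropWhile_cons_of_pos (by simpa using hc), pvCollapseB_cons, hc, hk]
        simpa using ih
      · rw [List.dropWhile_cons_of_neg (by simpa using hc)]

theorem pvDropHead {p : Char → Bool} {l : List Char} {c : Char} {t : List Char}
    (h : l.dropWhile p = c :: t) : p c = false := by
  induction l with
  | nil => simp [List.dropWhile] at h
  | cons x xs ih =>
      by_cases hx : p x
      · exact ih (by rwa [List.dropWhile_cons_of_pos hx] at h)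
      · rw [List.dropWhile_cons_of_neg (by simpa using hx)] at h
        cases h
        simpa using hx

-- after the run is dropped, the head no longer matches prev
theorem pvHeadDiff (k c : Char) (rest : List Char) (hc : pvTranslateA c ≠ k) :
    pvCollapseB (some k) (c :: rest) = pvCollapseB none (c :: rest) := by
  rw [pvCollapseB_cons, pvCollapseB_none_cons]
  have : (some k == some (pvTranslateA c)) = false := by
    rw [beq_eq_false_iff_ne]
    intro h'; exact hc (Option.some_inj.mp h').symm
  rw [this, Bool.false_and]; simp

-- a run of characters all translating to a non-collapsible k passes through B unchanged
theorem pvRunKeep (k : Char) (hk : pvCollapsibleB.contains k = false) :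
    ∀ (t d : List Char), (∀ x ∈ t, pvTranslateA x = k) →
      pvCollapseB none (t ++ d) = t.map pvTranslateA ++ pvCollapseB none d := by
  intro t
  induction t with
  | nil => intro d _; simp
  | cons x t' ih =>
      intro d hall
      have hx : pvTranslateA x = k := hall x (by simp)
      rw [List.cons_append, pvCollapseB_none_cons, hx, pvSkipNone k hk,
        ih d (fun y hy => hall y (by simp [hy])), List.map_cons, hx, List.cons_append]

-- main core equivalence: on space-free character lists, A's translate+groupby equals B's one pass
theorem pvMain : ∀ (l : List Char), ' ' ∉ l →
    pvGroupbyA (l.map pvTranslateA) = pvCollapseB none l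
  | [], _ => by simp [pvGroupbyA, pvCollapseB]
  | c :: rest, h => by
      have hc : c ≠ ' ' := fun h' => h (h' ▸ List.mem_cons_self ..)
      have hrest : ' ' ∉ rest := fun h' => h (List.mem_cons_of_mem _ h')
      have hrec := pvMain (rest.dropWhile (fun x => pvTranslateA x == pvTranslateA c))
        (fun h' => hrest ((List.dropWhile_sublist _).subset h'))
      simp only [List.map_cons, pvGroupbyA, List.takeWhile_map, List.dropWhile_map]
      have hcomp : ((fun x => x == pvTranslateA c) ∘ pvTranslateA)
          = (fun x => pvTranslateA x == pvTranslateA c) := rfl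
      rw [hcomp]
      by_cases hcl : (pvPunct.contains (pvTranslateA c) || pvWhitespace.contains (pvTranslateA c)) = true
      · -- collapsible key: one copy on both sides
        have hcoll : pvCollapsibleB.contains (pvTranslateA c) = true := by
          rw [← pvClassEq c hc]; exact hcl
        rw [if_pos hcl, pvCollapseB_none_cons, pvSkipRun _ hcoll rest]
        rcases hd : rest.dropWhile (fun x => pvTranslateA x == pvTranslateA c) with _ | ⟨c', t'⟩
        · simp [pvGroupbyA, pvCollapseB]
        · have hne : pvTranslateA c' ≠ pvTranslateA c := by simpa using pvDropHead hd
          rw [hd] at hrec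
          rw [pvHeadDiff _ c' t' hne, ← hrec]
          simp
      · -- non-collapsible key: the whole run is kept on both sides
        have hcoll : pvCollapsibleB.contains (pvTranslateA c) = false := by
          have := pvClassEq c hc
          rw [← this]; simpa using hcl
        rw [if_neg hcl, pvCollapseB_none_cons, pvSkipNone _ hcoll rest]
        conv_rhs => rw [← List.takeWhile_append_dropWhile
          (p := fun x => pvTranslateA x == pvTranslateA c) (l := rest)]
        rw [pvRunKeep _ hcoll _ _ (fun x hx => by simpa using List.mem_takeWhile_imp hx), hrec]
        simp
termination_by l => l.length
decreasing_by
  have := List.length_dropWhile_le (fun x => pvTranslateA x == pvTranslateA c) rest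
  simpa using Nat.lt_succ_of_le this

-- step (1) of both programs never leaves a space: replace removes them all
theorem pvReplaceGoNoSpace : ∀ (fuel : Nat) (l acc : List Char), l.length ≤ fuel → ' ' ∉ acc →
    ' ' ∉ PySem.Chars.replace.go [' '] ['_'] fuel l acc := by
  intro fuel
  induction fuel with
  | zero =>
      intro l acc hl ha
      have : l = [] := List.eq_nil_of_length_eq_zero (Nat.le_zero.mp hl)
      subst this
      simpa [PySem.Chars.replace.go] using ha
  | succ fuel ih =>
      intro l acc hl ha
      cases l with
      | nil => simpa [PySem.Chars.replace.go] using ha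
      | cons c t =>
          simp only [PySem.Chars.replace.go]
          by_cases hcsp : c = ' '
          · subst hcsp
            rw [if_pos (by simp [List.isPrefixOf])]
            have hlen : t.length ≤ fuel := by simpa using hl
            have hacc : ' ' ∉ ('_' :: acc) := by
              intro hm
              rcases List.mem_cons.mp hm with h' | h'
              · exact absurd h' (by decide)
              · exact ha h'
            simpa using ih (List.drop 1 (' ' :: t)) (['_'].reverse ++ acc)
              (by simpa using hlen) (by simpa using hacc)
          · rw [if_neg (by simp [List.isPrefixOf, Ne.symm hcsp])]
            have hacc : ' ' ∉ (c :: acc) := by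
              intro hm
              rcases List.mem_cons.mp hm with h' | h'
              · exact hcsp h'.symm
              · exact ha h'
            exact ih t (c :: acc) (by simpa using Nat.le_of_succ_le_succ hl) hacc

theorem pvUpperCharNeSpace (c : Char) (hc : c ≠ ' ') : PySem.Chars.upperChar c ≠ ' ' := by
  by_cases hl : PySem.Chars.islower c = true
  · have h1 : 'a' ≤ c := by
      have := hl; simp [PySem.Chars.islower] at this; exact this.1
    have h2 : c ≤ 'z' := by
      have := hl; simp [PySem.Chars.islower] at this; exact this.2
    simp only [PySem.Chars.upperChar, hl, if_true]
    intro hcEq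
    have h1' : 97 ≤ c.toNat := h1
    have h2' : c.toNat ≤ 122 := h2
    have hv : (c.toNat - 32).isValidChar := Or.inl (by omega)
    have hofs : (Char.ofNat (c.toNat - 32)).toNat = c.toNat - 32 := by
      rw [Char.toNat_ofNat, if_pos hv]
    rw [hcEq] at hofs
    have h32 : (' ' : Char).toNat = 32 := by decide
    omega
  · simpa [PySem.Chars.upperChar, hl] using hc

theorem pvNoSpaceUpper (s : List Char) (h : ' ' ∉ s) : ' ' ∉ PySem.Chars.upper s := by
  intro hm
  obtain ⟨c, hcs, hce⟩ := List.mem_map.mp hm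
  exact pvUpperCharNeSpace c (fun h' => h (h' ▸ hcs)) hce

theorem pvNoSpaceStrip (s chars : List Char) (h : ' ' ∉ s) : ' ' ∉ PySem.Chars.stripChars s chars := by
  intro hm
  apply h
  unfold PySem.Chars.stripChars at hm
  rw [List.mem_reverse] at hm
  have hm2 := (List.dropWhile_sublist _).subset hm
  rw [List.mem_reverse] at hm2
  exact (List.dropWhile_sublist _).subset hm2

theorem pvNoSpaceCol1 (col : String) :
    ' ' ∉ (PySem.Str.upper (PySem.Str.stripChars (PySem.Str.replace col " " "_") "_")).toList := by
  rw [PySem.Str.toList_upper, PySem.Str.toList_stripChars, PySem.Str.toList_replace]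
  have h1 : (" " : String).toList = [' '] := by decide
  have h2 : ("_" : String).toList = ['_'] := by decide
  rw [h1, h2]
  apply pvNoSpaceUpper
  apply pvNoSpaceStrip
  unfold PySem.Chars.replace
  rw [if_neg (by simp)]
  exact pvReplaceGoNoSpace _ _ _ le_rfl (by simp)

-- ===== VERDICT (by name: the statement is the Claim_ definition above) =====
theorem standardize_col_spec : Claim_equal_standardize_col := by
  intro col _
  unfold Spec_standardize_col standardize_col standardize_col_alt
  exact congrArg String.mk (pvMain _ (pvNoSpaceCol1 col))
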